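-- pv_equiv track=rewrite | github.com/pyelasticsearch/pyelasticsearch | pyelasticsearch/utils.py | bulk_chunks
-- ===== SOURCE A (Python) =====
-- def bulk_chunks(actions, docs_per_chunk=300, bytes_per_chunk=None):
--     """
--     Return groups of bulk-indexing operations to send to
--     :meth:`~pyelasticsearch.ElasticSearch.bulk()`.
--
--     Return an iterable of chunks, each of which is a JSON-encoded line or pair
--     of lines in the format understood by ES's bulk API.
--
--     :arg actions: An iterable of bulk actions, JSON-encoded. The best idea is
--         to pass me a list of the outputs from
--         :meth:`~pyelasticsearch.ElasticSearch.index_op()`,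
--         :meth:`~pyelasticsearch.ElasticSearch.delete_op()`, and
--         :meth:`~pyelasticsearch.ElasticSearch.update_op()`.
--     :arg docs_per_chunk: The number of documents (or, more technically,
--         actions) to put in each chunk. Set to None to use only
--         ``bytes_per_chunk``.
--     :arg bytes_per_chunk: The approximate number of bytes of HTTP body payload
--          to put in each chunk. Leave at None to use only ``docs_per_chunk``.
--          This option helps prevent timeouts when you have occasional very
--          large documents. Without it, you may get unlucky: several large docs
--          might land in one chunk, and ES might time out.
--
--     Chunks are capped by ``docs_per_chunk`` or ``bytes_per_chunk``, whichever
--     is reached first. Obviously, we cannot make a chunk to smaller than its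
--     smallest doc, but we do stop adding docs after that. If both
--     ``docs_per_chunk`` and ``bytes_per_chunk`` are None, all docs end up in
--     one big chunk (and you might as well not use this at all).
--     """
--     class Limiter(object):
--         def __init__(self):
--             self.reset()
--
--         def next_is_under_limit(self, encoded_action):
--             self.doc_count += 1
--             self.byte_count += len(encoded_action) + 1  # +1 for \n
--             return self.under_limit()
--
--         def under_limit(self):
--             if (docs_per_chunk is not None and
--                 self.doc_count >= docs_per_chunk):
--                     return False
--             if (bytes_per_chunk is not None and
--                 self.byte_count >= bytes_per_chunk):
--                     return False
--             return True
--
--         def reset(self):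
--             self.doc_count = self.byte_count = 0
--
--     def take_while_plus(predicate, iterable):
--         """
--         Like itertools.takewhile(), except include the item that made us
--         stop.
--
--         That way, we can call this repeatedly on the same iterable without
--         dropping things on the floor.
--         """
--         # take_while_plus(lambda x: x<5, [1,4,6,4,1]) --> 1 4 6
--         for x in iterable:
--             yield x
--             if not predicate(x):
--                 break
--
--     it = iter(actions)
--     limiter = Limiter()
--     while True:
--         # Yield one chunk:
--         chunk = list(take_while_plus(limiter.next_is_under_limit, it))
--         if chunk:  # Don't yield an empty chunk at the end.
--             yield chunk
--         else:  # We ran out of actions.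
--             break
--         limiter.reset()
-- ===== SOURCE B (Python) =====
-- def bulk_chunks(actions, docs_per_chunk=300, bytes_per_chunk=None):
--     chunk = []
--     doc_count = 0
--     byte_count = 0
--     for action in actions:
--         chunk.append(action)
--         doc_count += 1
--         byte_count += len(action) + 1  # +1 for \n
--         if ((docs_per_chunk is not None and doc_count >= docs_per_chunk) or
--                 (bytes_per_chunk is not None and byte_count >= bytes_per_chunk)):
--             yield chunk
--             chunk = []
--             doc_count = 0
--             byte_count = 0
--     if chunk:
--         yield chunk
-- ===== Notes on version B (the rewrite author's own statement) =====
-- stated objective: simpler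
-- what changed: Replaced A's inner Limiter class, take_while_plus helper generator and outer while-True loop with one flat for-loop over the actions that accumulates a chunk and two counters and flushes when a limit is crossed.
import Mathlib
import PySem

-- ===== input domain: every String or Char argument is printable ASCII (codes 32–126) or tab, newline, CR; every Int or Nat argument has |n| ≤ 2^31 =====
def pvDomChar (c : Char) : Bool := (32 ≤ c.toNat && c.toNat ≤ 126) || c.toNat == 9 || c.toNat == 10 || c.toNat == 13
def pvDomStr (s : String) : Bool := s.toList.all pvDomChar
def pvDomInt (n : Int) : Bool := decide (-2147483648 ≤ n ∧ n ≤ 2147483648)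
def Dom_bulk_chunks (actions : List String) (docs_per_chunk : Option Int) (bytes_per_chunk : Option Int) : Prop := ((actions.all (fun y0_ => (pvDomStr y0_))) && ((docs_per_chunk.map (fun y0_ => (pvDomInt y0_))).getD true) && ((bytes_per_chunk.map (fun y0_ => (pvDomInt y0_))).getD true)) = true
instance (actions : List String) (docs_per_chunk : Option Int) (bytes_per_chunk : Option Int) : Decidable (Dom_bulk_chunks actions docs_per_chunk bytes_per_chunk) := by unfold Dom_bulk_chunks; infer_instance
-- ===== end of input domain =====

-- B replaces A's inner Limiter class + take_while_plus generator + while-True outer loop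
-- by one flat loop with a chunk accumulator and two counters (objective: simpler; same results).

-- ===== PORT A =====
-- Limiter.under_limit: the two guards in A's order
def pvUnderLimit (docs_per_chunk bytes_per_chunk : Option Int) (doc_count byte_count : Int) : Bool :=
  if (match docs_per_chunk with | some d => decide (doc_count ≥ d) | none => false) then false
  else if (match bytes_per_chunk with | some b => decide (byte_count ≥ b) | none => false) then false
  else true

-- take_while_plus(limiter.next_is_under_limit, it): returns (chunk taken, rest of iterator);
-- the limiter state (doc_count, byte_count) is threaded through.
def pvTakeWhilePlus (docs_per_chunk bytes_per_chunk : Option Int) (doc_count byte_count : Int) :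
    List String → List String × List String
  | [] => ([], [])
  | x :: rest =>
    let doc_count' := doc_count + 1
    let byte_count' := byte_count + PySem.Str.len x + 1  -- +1 for \n
    if pvUnderLimit docs_per_chunk bytes_per_chunk doc_count' byte_count' then
      let p := pvTakeWhilePlus docs_per_chunk bytes_per_chunk doc_count' byte_count' rest
      (x :: p.1, p.2)
    else
      ([x], rest)

theorem pvTakeWhilePlus_rest_lt (docs_per_chunk bytes_per_chunk : Option Int)
    (doc_count byte_count : Int) (x : String) (rest : List String) :
    (pvTakeWhilePlus docs_per_chunk bytes_per_chunk doc_count byte_count (x :: rest)).2.length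
      < (x :: rest).length := by
  induction rest generalizing doc_count byte_count x with
  | nil => simp only [pvTakeWhilePlus]; split <;> simp
  | cons y ys ih =>
    simp only [pvTakeWhilePlus]
    split
    · exact Nat.lt_trans (ih _ _ _) (by simp)
    · simp

-- the outer 'while True' loop: take a chunk, yield it unless empty, reset the limiter
def pvLoopA (docs_per_chunk bytes_per_chunk : Option Int) (it : List String) :
    List (List String) :=
  match h : pvTakeWhilePlus docs_per_chunk bytes_per_chunk 0 0 it with
  | (chunk, rest) =>
    if chunk = [] then []
    else chunk :: pvLoopA docs_per_chunk bytes_per_chunk rest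
termination_by it.length
decreasing_by
  cases it with
  | nil => simp [pvTakeWhilePlus] at h; simp [← h.1] at *
  | cons x xs =>
    have := pvTakeWhilePlus_rest_lt docs_per_chunk bytes_per_chunk 0 0 x xs
    simpa [h] using this

def bulk_chunks (actions : List String) (docs_per_chunk : Option Int) (bytes_per_chunk : Option Int) : List (List String) :=
  pvLoopA docs_per_chunk bytes_per_chunk actions

-- ===== PORT B =====
-- B's flush condition, written as B writes it (a disjunction)
def pvLimitHit (docs_per_chunk bytes_per_chunk : Option Int) (doc_count byte_count : Int) : Bool :=
  (match docs_per_chunk with | some d => decide (doc_count ≥ d) | none => false) ||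
  (match bytes_per_chunk with | some b => decide (byte_count ≥ b) | none => false)

-- the flat for-loop of B, carrying (chunk, doc_count, byte_count)
def pvLoopB (docs_per_chunk bytes_per_chunk : Option Int) (chunk : List String)
    (doc_count byte_count : Int) : List String → List (List String)
  | [] => if chunk = [] then [] else [chunk]
  | action :: rest =>
    let chunk' := chunk ++ [action]
    let doc_count' := doc_count + 1
    let byte_count' := byte_count + PySem.Str.len action + 1  -- +1 for \n
    if pvLimitHit docs_per_chunk bytes_per_chunk doc_count' byte_count' then
      chunk' :: pvLoopB docs_per_chunk bytes_per_chunk [] 0 0 rest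
    else
      pvLoopB docs_per_chunk bytes_per_chunk chunk' doc_count' byte_count' rest

def bulk_chunks_alt (actions : List String) (docs_per_chunk : Option Int) (bytes_per_chunk : Option Int) : List (List String) :=
  pvLoopB docs_per_chunk bytes_per_chunk [] 0 0 actions

-- ===== PRECONDITION & SPEC =====
def Spec_bulk_chunks (actions : List String) (docs_per_chunk : Option Int) (bytes_per_chunk : Option Int) (out : List (List String)) : Prop := out = bulk_chunks_alt actions docs_per_chunk bytes_per_chunk
instance (actions : List String) (docs_per_chunk : Option Int) (bytes_per_chunk : Option Int) (out : List (List String)) : Decidable (Spec_bulk_chunks actions docs_per_chunk bytes_per_chunk out) := by unfold Spec_bulk_chunks; infer_instance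

-- ===== CLAIM (what is proved, stated in full; the proofs are below) =====
def Claim_equal_bulk_chunks : Prop := ∀ (actions : List String) (docs_per_chunk : Option Int) (bytes_per_chunk : Option Int), Dom_bulk_chunks actions docs_per_chunk bytes_per_chunk → Spec_bulk_chunks actions docs_per_chunk bytes_per_chunk (bulk_chunks actions docs_per_chunk bytes_per_chunk)

-- ===== LEMMAS AND PROOFS =====

theorem pvLimitHit_eq (dpc bpc : Option Int) (dc bc : Int) :
    pvLimitHit dpc bpc dc bc = ! pvUnderLimit dpc bpc dc bc := by
  unfold pvLimitHit pvUnderLimit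
  cases dpc <;> cases bpc <;> simp

theorem pvTakeWhilePlus_nonempty (dpc bpc : Option Int) (dc bc : Int) (x : String)
    (rest : List String) :
    (pvTakeWhilePlus dpc bpc dc bc (x :: rest)).1 ≠ [] := by
  simp only [pvTakeWhilePlus]; split <;> simp

theorem pvLoopB_eq (dpc bpc : Option Int) (l : List String) :
    ∀ (chunk : List String) (dc bc : Int),
    pvLoopB dpc bpc chunk dc bc l =
      (let p := pvTakeWhilePlus dpc bpc dc bc l
       if p.1 = [] then (if chunk = [] then [] else [chunk])
       else (chunk ++ p.1) :: pvLoopA dpc bpc p.2) := by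
  induction l with
  | nil => intro chunk dc bc; simp [pvLoopB, pvTakeWhilePlus]
  | cons x rest ih =>
    intro chunk dc bc
    simp only [pvLoopB, pvTakeWhilePlus, pvLimitHit_eq]
    by_cases hu : pvUnderLimit dpc bpc (dc + 1) (bc + PySem.Str.len x + 1) = true
    · simp only [hu, Bool.not_true, if_false, if_true, Bool.false_eq_true]
      rw [ih]
      cases rest with
      | nil =>
        simp [pvTakeWhilePlus, pvLoopA]
      | cons y ys =>
        have hne := pvTakeWhilePlus_nonempty dpc bpc (dc + 1) (bc + PySem.Str.len x + 1) y ys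
        simp only [PySem.Str.len_eq, String.length_toList] at hne
        simp [hne]
    · simp only [Bool.not_eq_true] at hu
      simp only [hu, Bool.not_false, if_true, Bool.false_eq_true, if_false]
      rw [ih]
      have : pvLoopA dpc bpc rest =
          (let p := pvTakeWhilePlus dpc bpc 0 0 rest
           if p.1 = [] then [] else p.1 :: pvLoopA dpc bpc p.2) := by
        rw [pvLoopA]
      rw [this]
      cases hp : pvTakeWhilePlus dpc bpc 0 0 rest with
      | mk c r =>
        by_cases hc : c = []
        · cases rest with
          | nil =>
            simp only [pvTakeWhilePlus, Prod.mk.injEq] at hp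
            simp [hc]
          | cons y ys =>
            exact absurd (hp ▸ pvTakeWhilePlus_nonempty dpc bpc 0 0 y ys) (by simp [hc])
        · simp [hc]

-- ===== VERDICT (by name: the statement is the Claim_ definition above) =====
theorem bulk_chunks_spec : Claim_equal_bulk_chunks := by
  intro actions dpc bpc _
  unfold Spec_bulk_chunks bulk_chunks bulk_chunks_alt
  rw [pvLoopB_eq, pvLoopA]
  cases h : pvTakeWhilePlus dpc bpc 0 0 actions with
  | mk c r => by_cases hc : c = [] <;> simp [hc]
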